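-- pv_equiv track=rewrite | github.com/it-sourabh/gittestrep | Replace_letter.py | transl
-- ===== SOURCE A (Python) =====
-- def transl(phrase, l, k):
--     translation = ""
--     for letter in phrase:
--         if letter in k:
--             if letter.isupper():
--                 translation = translation + l.upper()
--             else:
--                 translation = translation +l.lower()
--         else:
--             translation = translation + letter
--     return translation
-- ===== SOURCE B (Python) =====
-- def transl(phrase, l, k):
--     ks = set(k)
--     up, low = l.upper(), l.lower()
--     parts = []
--     rest = phrase
--     while rest:
--         i = 0
--         while i < len(rest) and rest[i] not in ks:
--             i += 1
--         parts.append(rest[:i])          # copy the whole unmatched run in one slice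
--         if i < len(rest):
--             parts.append(up if rest[i].isupper() else low)
--             rest = rest[i + 1:]
--         else:
--             rest = rest[i:]
--     return "".join(parts)
-- ===== Notes on version B (the rewrite author's own statement) =====
-- stated objective: alternative
-- what changed: B is a two-pointer run scan: it locates each maximal run of characters not in set(k), appends the whole run as one slice, then appends one case-matched replacement for the delimiter character, and joins the parts once, instead of A's character-by-character loop that tests membership in k and concatenates onto the growing string each step.
import Mathlib
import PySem

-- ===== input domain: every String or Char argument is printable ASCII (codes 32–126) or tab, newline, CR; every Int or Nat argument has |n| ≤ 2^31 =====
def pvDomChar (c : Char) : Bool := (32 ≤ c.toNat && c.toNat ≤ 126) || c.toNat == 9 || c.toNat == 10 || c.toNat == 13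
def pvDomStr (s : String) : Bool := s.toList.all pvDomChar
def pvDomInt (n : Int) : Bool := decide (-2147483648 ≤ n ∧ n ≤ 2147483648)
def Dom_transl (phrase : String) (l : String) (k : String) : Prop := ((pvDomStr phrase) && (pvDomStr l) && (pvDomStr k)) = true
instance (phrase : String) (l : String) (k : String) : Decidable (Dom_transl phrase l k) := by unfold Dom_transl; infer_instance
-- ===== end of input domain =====

-- B replaces A's character-by-character build-up by a two-pointer run scan: it finds each
-- maximal run of unmatched characters, copies it wholesale as one slice, emits one
-- replacement for the matched character after it, and joins the collected parts (alternative).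

-- ===== PORT A =====
-- literal transliteration of A: accumulate `translation` over the characters of phrase
def transl (phrase : String) (l : String) (k : String) : String :=
  String.mk (phrase.toList.foldl
    (fun translation letter =>
      if k.toList.contains letter then
        if PySem.Chars.isupper letter then
          translation ++ PySem.Chars.upper l.toList
        else
          translation ++ PySem.Chars.lower l.toList
      else
        translation ++ [letter])
    [])

-- ===== PORT B =====
-- inner `while i < len(rest) and rest[i] not in ks: i += 1` — the final value of i

def translRun (ks : PySem.Set Char) : List Char → Nat
  | [] => 0
  | c :: t => if PySem.Set.contains ks c then 0 else translRun ks t + 1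

def translGo (ks : PySem.Set Char) (up low : List Char) (rest : List Char) : List (List Char) :=
  match rest with
  | [] => []
  | c0 :: t0 =>
    -- i := translRun ks (c0 :: t0) is the inner while-loop's final i; rest.drop i is rest[i:]
    match hd : (c0 :: t0).drop (translRun ks (c0 :: t0)) with
    | [] => [(c0 :: t0).take (translRun ks (c0 :: t0))]
    | c :: t =>
        (c0 :: t0).take (translRun ks (c0 :: t0)) ::
          (if PySem.Chars.isupper c then up else low) :: translGo ks up low t
termination_by rest.length
decreasing_by
  have h1 : ((c0 :: t0).drop (translRun ks (c0 :: t0))).length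
      = (c0 :: t0).length - translRun ks (c0 :: t0) := by simp
  rw [hd] at h1
  simp at h1
  simp
  omega


-- literal transliteration of B: set of k, the run scan over rest, "".join(parts)
def transl_alt (phrase : String) (l : String) (k : String) : String :=
  let ks := PySem.Set.ofList k.toList
  let up := PySem.Chars.upper l.toList
  let low := PySem.Chars.lower l.toList
  String.mk (PySem.Chars.join [] (translGo ks up low phrase.toList))

-- ===== PRECONDITION & SPEC =====
def Spec_transl (phrase : String) (l : String) (k : String) (out : String) : Prop := out = transl_alt phrase l k
instance (phrase : String) (l : String) (k : String) (out : String) : Decidable (Spec_transl phrase l k out) := by unfold Spec_transl; infer_instance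

-- ===== CLAIM (what is proved, stated in full; the proofs are below) =====
def Claim_equal_transl : Prop := ∀ (phrase : String) (l : String) (k : String), Dom_transl phrase l k → Spec_transl phrase l k (transl phrase l k)

-- ===== LEMMAS AND PROOFS =====

theorem intersperse_nil_flatten (ps : List (List Char)) :
    (List.intersperse ([] : List Char) ps).flatten = ps.flatten := by
  induction ps with
  | nil => simp
  | cons p ps ih => cases ps <;> simp_all [List.intersperse]

theorem join_nil_eq_flatten (ps : List (List Char)) :
    PySem.Chars.join [] ps = ps.flatten := by
  simp [PySem.Chars.join, List.intercalate, intersperse_nil_flatten]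

-- the two unfolding equations of translGo, selected by the value of rest[i:]
theorem translGo_drop_nil (ks : PySem.Set Char) (up low : List Char) (c0 : Char) (t0 : List Char)
    (h : (c0 :: t0).drop (translRun ks (c0 :: t0)) = []) :
    translGo ks up low (c0 :: t0) = [(c0 :: t0).take (translRun ks (c0 :: t0))] := by
  rw [translGo.eq_def]
  split
  · next heq => simp at heq
  · next c1 t1 heq =>
      injection heq with e1 e2; subst e1; subst e2
      split
      · rfl
      · next c2 t2 heq2 => rw [h] at heq2; cases heq2

theorem translGo_drop_cons (ks : PySem.Set Char) (up low : List Char) (c0 : Char) (t0 : List Char)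
    (c : Char) (t : List Char)
    (h : (c0 :: t0).drop (translRun ks (c0 :: t0)) = c :: t) :
    translGo ks up low (c0 :: t0)
      = (c0 :: t0).take (translRun ks (c0 :: t0))
          :: (if PySem.Chars.isupper c then up else low) :: translGo ks up low t := by
  rw [translGo.eq_def]
  split
  · next heq => simp at heq
  · next c1 t1 heq =>
      injection heq with e1 e2; subst e1; subst e2
      split
      · next heq2 => rw [h] at heq2; cases heq2
      · next c2 t2 heq2 =>
          rw [h] at heq2
          injection heq2 with e1 e2; subst e1; subst e2
          rfl

-- one step of the run scan, on the flattened parts: peeling one character off rest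
theorem flatten_translGo_cons (ks : PySem.Set Char) (up low : List Char) (c : Char) (t : List Char) :
    (translGo ks up low (c :: t)).flatten
      = (if c ∈ ks then (if PySem.Chars.isupper c then up else low) else [c])
          ++ (translGo ks up low t).flatten := by
  by_cases hc : c ∈ ks
  · have hi : translRun ks (c :: t) = 0 := by simp [translRun, hc]
    have h : (c :: t).drop (translRun ks (c :: t)) = c :: t := by rw [hi]; rfl
    rw [translGo_drop_cons ks up low c t c t h, if_pos hc]
    simp [hi]
  · have hi : translRun ks (c :: t) = translRun ks t + 1 := by simp [translRun, hc]
    rw [if_neg hc]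
    cases hd : t.drop (translRun ks t) with
    | nil =>
      have h : (c :: t).drop (translRun ks (c :: t)) = [] := by
        rw [hi, List.drop_succ_cons]; exact hd
      rw [translGo_drop_nil ks up low c t h]
      cases t with
      | nil => simp [hi, translGo]
      | cons c' t' =>
        rw [translGo_drop_nil ks up low c' t' hd]
        simp [hi]
    | cons d t2 =>
      have h : (c :: t).drop (translRun ks (c :: t)) = d :: t2 := by
        rw [hi, List.drop_succ_cons]; exact hd
      rw [translGo_drop_cons ks up low c t d t2 h]
      cases t with
      | nil => simp at hd
      | cons c' t' =>
        rw [translGo_drop_cons ks up low c' t' d t2 hd]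
        simp [hi]

-- the run scan produces, character for character, A's per-character substitution
theorem flatten_translGo (ks : PySem.Set Char) (up low : List Char) (xs : List Char) :
    (translGo ks up low xs).flatten
      = xs.flatMap (fun c =>
          if c ∈ ks then (if PySem.Chars.isupper c then up else low) else [c]) := by
  induction xs with
  | nil => rw [translGo.eq_def]; simp
  | cons c t ih => rw [flatten_translGo_cons, ih]; simp

-- ===== VERDICT (by name: the statement is the Claim_ definition above) =====
theorem transl_spec : Claim_equal_transl := by
  intro phrase l k _
  unfold Spec_transl transl transl_alt
  have hf : (fun (translation : List Char) (letter : Char) =>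
      if k.toList.contains letter then
        if PySem.Chars.isupper letter then
          translation ++ PySem.Chars.upper l.toList
        else
          translation ++ PySem.Chars.lower l.toList
      else
        translation ++ [letter])
    = fun (translation : List Char) (letter : Char) =>
        translation ++ (if k.toList.contains letter then
            if PySem.Chars.isupper letter then PySem.Chars.upper l.toList
            else PySem.Chars.lower l.toList
          else [letter]) := by
    funext t c; split_ifs <;> rfl
  rw [hf, PySem.List.foldl_append_eq_flatMap]
  show _ = String.mk (PySem.Chars.join [] (translGo (PySem.Set.ofList k.toList)
      (PySem.Chars.upper l.toList) (PySem.Chars.lower l.toList) phrase.toList))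
  rw [join_nil_eq_flatten, flatten_translGo]
  simp [PySem.Set.mem_ofList]
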